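-- pv_equiv track=rewrite | github.com/Dhruv0705/Python | BSC/CAC190/Problem Set 3/primaryArithmetic.py | carriesCount
-- ===== SOURCE A (Python) =====
-- def carriesCount(num1, num2):
--
--     # Sets the value of carry and count to nothing or 0
--     carry = 0
--     count = 0
--
--     # Find the length of num1 and num2
--     lengthOfNum1 = len(num1)
--     lengthofNum2 = len(num2)
--
--     # While lengthofnum1 and 2 is not equal to 0 then:
--     while (lengthOfNum1 !=0 or lengthofNum2 !=0):
--
--         # Sets the value of the counter to 0
--         num1carryCount = 0
--         num2carryCount = 0
--
--         # If the length of num1 is greather then 0: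
--         if (lengthOfNum1 > 0):
--
--         # Will loop thorugh until the lengthofnum1 and lengthofnum2 is less then 0 this method will start in order 2 adding the values of the given input in order to find the remainer as the if statment will reloop until there is no remianers.
--             num1carryCount = int(num1[lengthOfNum1 - 1]) + int('0')
--             lengthOfNum1 -= 1
--
--         if (lengthofNum2 > 0):
--             num2carryCount = int(num2[lengthofNum2 - 1]) + int('0')
--             lengthofNum2 -= 1
--
--         # Add operation to total sum
--         totalSum = num1carryCount + num2carryCount + carry
--
--         # If totalsum > 10
--         if (totalSum >= 10):
--
--             # Set carry to 1
--             carry = 1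
--
--             # Then increment count by 1
--             count += 1
--
--         # Else, set carry to 0
--         else:
--             carry = 0
--
--     # Return function
--     return count
-- ===== SOURCE B (Python) =====
-- def carriesCount(num1, num2):
--     # A carry comes out of decimal position k (counting from the right, k = 1..n)
--     # iff the low-k-digit suffixes of the two numbers sum to at least 10**k;
--     # count those positions directly instead of propagating a carry bit.
--     r1 = [int(c) for c in reversed(num1)]
--     r2 = [int(c) for c in reversed(num2)]
--     n = max(len(r1), len(r2))
--     r1 += [0] * (n - len(r1))
--     r2 += [0] * (n - len(r2))
--     count, p, m1, m2 = 0, 1, 0, 0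
--     for x, y in zip(r1, r2):
--         m1 += x * p
--         m2 += y * p
--         p *= 10
--         if m1 + m2 >= p:
--             count += 1
--     return count
-- ===== Notes on version B (the rewrite author's own statement) =====
-- stated objective: alternative
-- what changed: B drops A's carry-propagation loop entirely: it counts a carry out of decimal position k exactly when the low-k-digit suffixes of the two numbers sum to at least 10^k, maintaining the suffix values and the growing power of ten in one pass over the zipped reversed digit lists.
import Mathlib
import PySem

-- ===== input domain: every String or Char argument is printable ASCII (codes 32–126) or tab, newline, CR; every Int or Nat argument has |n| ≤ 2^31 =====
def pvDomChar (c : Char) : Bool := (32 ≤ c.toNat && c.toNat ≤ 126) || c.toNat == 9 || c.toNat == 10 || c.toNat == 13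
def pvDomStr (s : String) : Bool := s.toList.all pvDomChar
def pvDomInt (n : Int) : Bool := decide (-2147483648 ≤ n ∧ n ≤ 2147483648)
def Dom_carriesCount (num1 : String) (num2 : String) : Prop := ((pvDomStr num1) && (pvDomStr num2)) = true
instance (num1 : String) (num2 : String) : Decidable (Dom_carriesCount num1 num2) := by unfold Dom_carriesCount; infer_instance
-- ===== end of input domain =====

-- B replaces A's right-to-left carry-propagation loop by a carry-free count of the
-- decimal positions k whose low-k-digit suffixes sum to at least 10^k (alternative algorithm).

-- ===== PORT A =====
-- int(c) for a one-character string; .getD 0 only totalizes the ValueError case (non-digit), which Pre_ excludes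
def pyIntChar (c : Char) : Int := (PySem.Int.ofChars? [c]).getD 0

-- the while-loop of A: the two index variables count down from the lengths to 0
def carriesCountLoop (cs1 cs2 : List Char) (l1 l2 : Nat) (carry count : Int) : Int :=
  if l1 = 0 ∧ l2 = 0 then count
  else
    let num1carryCount : Int := if 0 < l1 then pyIntChar (cs1.getD (l1-1) ' ') + pyIntChar '0' else 0
    let l1' : Nat := if 0 < l1 then l1 - 1 else l1
    let num2carryCount : Int := if 0 < l2 then pyIntChar (cs2.getD (l2-1) ' ') + pyIntChar '0' else 0
    let l2' : Nat := if 0 < l2 then l2 - 1 else l2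
    if 10 ≤ num1carryCount + num2carryCount + carry then carriesCountLoop cs1 cs2 l1' l2' 1 (count + 1)
    else carriesCountLoop cs1 cs2 l1' l2' 0 count
  termination_by l1 + l2
  decreasing_by all_goals (split_ifs <;> omega)

def carriesCount (num1 : String) (num2 : String) : Int :=
  carriesCountLoop num1.toList num2.toList num1.toList.length num2.toList.length 0 0

-- ===== PORT B =====
-- the body of B's for-loop over the zipped padded reversed digit lists; state = (count, p, m1, m2)
def stepB (st : Int × Int × Int × Int) (xy : Int × Int) : Int × Int × Int × Int :=
  let m1 := st.2.2.1 + xy.1 * st.2.1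
  let m2 := st.2.2.2 + xy.2 * st.2.1
  let p := st.2.1 * 10
  if m1 + m2 ≥ p then (st.1 + 1, p, m1, m2) else (st.1, p, m1, m2)

def carriesCount_alt (num1 : String) (num2 : String) : Int :=
  let r1 := num1.toList.reverse.map pyIntChar
  let r2 := num2.toList.reverse.map pyIntChar
  let n := max r1.length r2.length
  let p1 := r1 ++ List.replicate (n - r1.length) 0
  let p2 := r2 ++ List.replicate (n - r2.length) 0
  ((p1.zip p2).foldl stepB (0, 1, 0, 0)).1

-- ===== PRECONDITION & SPEC =====
def digitChars : List Char := ['0','1','2','3','4','5','6','7','8','9']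

-- exactly the inputs on which A returns: every character of both strings is a decimal digit
-- (on any other character int(...) raises ValueError in A; B raises there too)
def Pre_carriesCount (num1 : String) (num2 : String) : Prop :=
  (num1.toList.all (· ∈ digitChars) && num2.toList.all (· ∈ digitChars)) = true
instance (num1 : String) (num2 : String) : Decidable (Pre_carriesCount num1 num2) := by
  unfold Pre_carriesCount; infer_instance

def pvWitness_carriesCount : String × String := ("8", "5")

def Spec_carriesCount (num1 : String) (num2 : String) (out : Int) : Prop := out = carriesCount_alt num1 num2
instance (num1 : String) (num2 : String) (out : Int) : Decidable (Spec_carriesCount num1 num2 out) := by unfold Spec_carriesCount; infer_instance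

-- ===== CLAIM (what is proved, stated in full; the proofs are below) =====
def Claim_equal_carriesCount : Prop := ∀ (num1 : String) (num2 : String), Dom_carriesCount num1 num2 → Pre_carriesCount num1 num2 → Spec_carriesCount num1 num2 (carriesCount num1 num2)

-- ===== LEMMAS AND PROOFS =====

-- digit value of a digit character
def dl (c : Char) : Int := (c.toNat : Int) - 48

theorem pyIntChar_digit : ∀ c ∈ digitChars, pyIntChar c = dl c := by
  intro c hc
  simp only [digitChars, List.mem_cons, List.not_mem_nil, or_false] at hc
  rcases hc with rfl|rfl|rfl|rfl|rfl|rfl|rfl|rfl|rfl|rfl <;> rfl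

theorem pyIntChar_zero : pyIntChar '0' = 0 := rfl

theorem dl_digit : ∀ c ∈ digitChars, 0 ≤ dl c ∧ dl c ≤ 9 := by
  intro c hc
  simp only [digitChars, List.mem_cons, List.not_mem_nil, or_false] at hc
  rcases hc with rfl|rfl|rfl|rfl|rfl|rfl|rfl|rfl|rfl|rfl <;> decide

-- digit lists (values 0..9)
def Dg (r : List Int) : Prop := ∀ d ∈ r, 0 ≤ d ∧ d ≤ 9

-- A's carry loop, abstracted to little-endian digit lists
def loopR (r1 r2 : List Int) (c cnt : Int) : Int :=
  if r1 = [] ∧ r2 = [] then cnt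
  else if 10 ≤ r1.headD 0 + r2.headD 0 + c then loopR r1.tail r2.tail 1 (cnt + 1)
  else loopR r1.tail r2.tail 0 cnt
  termination_by r1.length + r2.length
  decreasing_by
    all_goals rcases r1 with _|⟨a,r1⟩ <;> rcases r2 with _|⟨b,r2⟩ <;> simp_all
    all_goals omega

theorem loopR_ne (r1 r2 : List Int) (c cnt : Int) (h : ¬(r1 = [] ∧ r2 = [])) :
    loopR r1 r2 c cnt =
      if 10 ≤ r1.headD 0 + r2.headD 0 + c then loopR r1.tail r2.tail 1 (cnt + 1)
      else loopR r1.tail r2.tail 0 cnt := by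
  rw [loopR, if_neg h]

-- ===== A-side bridge: the index loop is loopR on the reversed digit lists =====
theorem loopA_eq (cs1 cs2 : List Char) (hd1 : ∀ c ∈ cs1, c ∈ digitChars)
    (hd2 : ∀ c ∈ cs2, c ∈ digitChars) :
    ∀ (n l1 l2 : Nat), l1 + l2 = n → l1 ≤ cs1.length → l2 ≤ cs2.length → ∀ (carry count : Int),
    carriesCountLoop cs1 cs2 l1 l2 carry count =
      loopR (((cs1.take l1).reverse).map dl) (((cs2.take l2).reverse).map dl) carry count := by
  intro n
  induction n using Nat.strong_induction_on with
  | _ n ih =>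
    intro l1 l2 hn h1 h2 carry count
    by_cases hz : l1 = 0 ∧ l2 = 0
    · rw [carriesCountLoop, if_pos hz]
      obtain ⟨e1, e2⟩ := hz
      subst e1; subst e2
      rw [loopR]
      simp
    · -- describe the reversed taken lists
      have hside : ∀ (cs : List Char) (l : Nat), (∀ c ∈ cs, c ∈ digitChars) → 0 < l → l ≤ cs.length →
          ((cs.take l).reverse).map dl
            = (pyIntChar (cs.getD (l-1) ' ') + pyIntChar '0') :: ((cs.take (l-1)).reverse).map dl := by
        intro cs l hdc hl hlen
        obtain ⟨k, rfl⟩ : ∃ k, l = k + 1 := ⟨l - 1, by omega⟩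
        have hk : k < cs.length := by omega
        have htake : cs.take (k+1) = cs.take k ++ [cs[k]] := by
          rw [List.take_add_one]
          simp [List.getElem?_eq_getElem hk]
        have hgetD : cs.getD k ' ' = cs[k] := List.getD_eq_getElem cs ' ' hk
        rw [htake]
        simp only [List.reverse_append, List.reverse_cons, List.reverse_nil, List.nil_append,
          List.singleton_append, List.map_cons, Nat.add_sub_cancel, hgetD]
        rw [pyIntChar_zero, pyIntChar_digit cs[k] (hdc _ (List.getElem_mem hk))]
        simp
      rw [carriesCountLoop, if_neg hz]
      rcases Nat.eq_zero_or_pos l1 with hl1 | hl1 <;> rcases Nat.eq_zero_or_pos l2 with hl2 | hl2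
      · omega
      · -- l1 = 0, l2 > 0
        subst hl1
        simp only [if_neg (show ¬ (0:Nat) < 0 by omega), if_pos hl2]
        rw [hside cs2 l2 hd2 hl2 h2]
        rw [loopR_ne _ _ _ _ (by simp)]
        simp only [List.take_zero, List.reverse_nil, List.map_nil, List.headD_nil, List.headD_cons,
          List.tail_nil, List.tail_cons, zero_add, List.getD_eq_getElem?_getD]
        split_ifs with hA
        · exact ih (0 + (l2 - 1)) (by omega) 0 (l2 - 1) rfl (by omega) (by omega) 1 (count + 1)
        · exact ih (0 + (l2 - 1)) (by omega) 0 (l2 - 1) rfl (by omega) (by omega) 0 count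
      · -- l1 > 0, l2 = 0
        subst hl2
        simp only [if_neg (show ¬ (0:Nat) < 0 by omega), if_pos hl1]
        rw [hside cs1 l1 hd1 hl1 h1]
        rw [loopR_ne _ _ _ _ (by simp)]
        simp only [List.take_zero, List.reverse_nil, List.map_nil, List.headD_nil, List.headD_cons,
          List.tail_nil, List.tail_cons, add_zero, List.getD_eq_getElem?_getD]
        split_ifs with hA
        · exact ih ((l1 - 1) + 0) (by omega) (l1 - 1) 0 rfl (by omega) (by omega) 1 (count + 1)
        · exact ih ((l1 - 1) + 0) (by omega) (l1 - 1) 0 rfl (by omega) (by omega) 0 count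
      · -- both positive
        simp only [if_pos hl1, if_pos hl2]
        rw [hside cs1 l1 hd1 hl1 h1, hside cs2 l2 hd2 hl2 h2]
        rw [loopR_ne _ _ _ _ (by simp)]
        simp only [List.headD_cons, List.tail_cons, List.getD_eq_getElem?_getD]
        split_ifs with hA
        · exact ih ((l1 - 1) + (l2 - 1)) (by omega) (l1 - 1) (l2 - 1) rfl (by omega) (by omega) 1 (count + 1)
        · exact ih ((l1 - 1) + (l2 - 1)) (by omega) (l1 - 1) (l2 - 1) rfl (by omega) (by omega) 0 count

-- ===== B-side bridge: the fold counts the positions whose suffix sums reach the power =====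

-- what B's fold computes, as a structural recursion (state without the count)
def Kspec : List (Int × Int) → Int → Int → Int → Int
  | [], _, _, _ => 0
  | xy :: z, p, m1, m2 =>
      (if m1 + xy.1 * p + (m2 + xy.2 * p) ≥ p * 10 then (1:Int) else 0)
        + Kspec z (p * 10) (m1 + xy.1 * p) (m2 + xy.2 * p)

theorem stepB_apply (cnt p m1 m2 : Int) (xy : Int × Int) :
    stepB (cnt, p, m1, m2) xy =
      if m1 + xy.1 * p + (m2 + xy.2 * p) ≥ p * 10
      then (cnt + 1, p * 10, m1 + xy.1 * p, m2 + xy.2 * p)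
      else (cnt, p * 10, m1 + xy.1 * p, m2 + xy.2 * p) := rfl

theorem foldB_eq_K (z : List (Int × Int)) :
    ∀ (cnt p m1 m2 : Int), (z.foldl stepB (cnt, p, m1, m2)).1 = cnt + Kspec z p m1 m2 := by
  induction z with
  | nil => intro cnt p m1 m2; simp [Kspec]
  | cons xy z ih =>
    intro cnt p m1 m2
    rw [List.foldl_cons, stepB_apply, Kspec]
    split_ifs with h
    · rw [ih]; ring
    · rw [ih]; ring

-- the carry bit of A is exactly "the suffix sums reach the current power" of B
theorem loopR_eq_K (z : List (Int × Int)) :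
    ∀ (p m1 m2 c cnt : Int), Dg (z.map Prod.fst) → Dg (z.map Prod.snd) →
    0 < p → 0 ≤ m1 → m1 < p → 0 ≤ m2 → m2 < p → (c = (if p ≤ m1 + m2 then 1 else 0)) →
    loopR (z.map Prod.fst) (z.map Prod.snd) c cnt = cnt + Kspec z p m1 m2 := by
  induction z with
  | nil =>
    intro p m1 m2 c cnt _ _ _ _ _ _ _ _
    simp [loopR, Kspec]
  | cons xy z ih =>
    intro p m1 m2 c cnt h1 h2 hp hm10 hm1p hm20 hm2p hcinv
    have hx : 0 ≤ xy.1 ∧ xy.1 ≤ 9 := h1 xy.1 (by simp)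
    have hy : 0 ≤ xy.2 ∧ xy.2 ≤ 9 := h2 xy.2 (by simp)
    have ht1 : Dg (z.map Prod.fst) := fun d hd => h1 d (by simp [hd])
    have ht2 : Dg (z.map Prod.snd) := fun d hd => h2 d (by simp [hd])
    have hc01 : c = 0 ∨ c = 1 := by rw [hcinv]; split_ifs <;> simp
    -- the two conditions are equivalent
    have hiff : (10 ≤ xy.1 + xy.2 + c) ↔ (p * 10 ≤ m1 + xy.1 * p + (m2 + xy.2 * p)) := by
      constructor
      · intro h
        rw [hcinv] at h
        split_ifs at h with hs
        · nlinarith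
        · nlinarith
      · intro h
        rw [hcinv]
        split_ifs with hs
        · nlinarith
        · nlinarith
    rw [List.map_cons, List.map_cons, loopR_ne _ _ _ _ (by simp)]
    simp only [List.headD_cons, List.tail_cons]
    rw [Kspec]
    have hm10' : (0:Int) ≤ m1 + xy.1 * p := by nlinarith
    have hm1p' : m1 + xy.1 * p < p * 10 := by nlinarith
    have hm20' : (0:Int) ≤ m2 + xy.2 * p := by nlinarith
    have hm2p' : m2 + xy.2 * p < p * 10 := by nlinarith
    by_cases hcond : 10 ≤ xy.1 + xy.2 + c
    · have hge : p * 10 ≤ m1 + xy.1 * p + (m2 + xy.2 * p) := hiff.mp hcond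
      rw [if_pos hcond, if_pos (show m1 + xy.1 * p + (m2 + xy.2 * p) ≥ p * 10 from hge)]
      rw [ih (p * 10) (m1 + xy.1 * p) (m2 + xy.2 * p) 1 (cnt + 1) ht1 ht2 (by nlinarith)
        hm10' hm1p' hm20' hm2p' (by rw [if_pos hge])]
      ring
    · have hlt : ¬ p * 10 ≤ m1 + xy.1 * p + (m2 + xy.2 * p) := fun hh => hcond (hiff.mpr hh)
      rw [if_neg hcond, if_neg (show ¬ m1 + xy.1 * p + (m2 + xy.2 * p) ≥ p * 10 from hlt)]
      rw [ih (p * 10) (m1 + xy.1 * p) (m2 + xy.2 * p) 0 cnt ht1 ht2 (by nlinarith)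
        hm10' hm1p' hm20' hm2p' (by rw [if_neg hlt])]
      ring

-- padding both digit lists with high zeros does not change the carry loop
theorem headD_replicate (k : Nat) : (List.replicate k (0:Int)).headD 0 = 0 := by
  cases k <;> simp [List.replicate_succ]

theorem tail_replicate (k : Nat) : (List.replicate k (0:Int)).tail = List.replicate (k-1) 0 := by
  cases k <;> simp

theorem loopR_zeros : ∀ (n k1 k2 : Nat), k1 + k2 = n → ∀ (c cnt : Int), (c = 0 ∨ c = 1) →
    loopR (List.replicate k1 0) (List.replicate k2 0) c cnt = cnt := by
  intro n
  induction n using Nat.strong_induction_on with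
  | _ n ih =>
    intro k1 k2 hn c cnt hc
    by_cases hz : k1 = 0 ∧ k2 = 0
    · obtain ⟨rfl, rfl⟩ := hz
      simp [loopR]
    · rw [loopR_ne _ _ _ _ (by
        simp only [List.replicate_eq_nil_iff]
        omega)]
      rw [headD_replicate, headD_replicate, tail_replicate, tail_replicate,
        if_neg (show ¬(10:Int) ≤ 0 + 0 + c by rcases hc with rfl | rfl <;> norm_num)]
      exact ih ((k1-1) + (k2-1)) (by omega) (k1-1) (k2-1) rfl 0 cnt (Or.inl rfl)

theorem loopR_pad : ∀ (n : Nat) (r1 r2 : List Int), r1.length + r2.length = n →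
    ∀ (k1 k2 : Nat) (c cnt : Int), (c = 0 ∨ c = 1) →
    loopR (r1 ++ List.replicate k1 0) (r2 ++ List.replicate k2 0) c cnt = loopR r1 r2 c cnt := by
  intro n
  induction n using Nat.strong_induction_on with
  | _ n ih =>
    intro r1 r2 hn k1 k2 c cnt hc
    rcases r1 with _|⟨x, t1⟩ <;> rcases r2 with _|⟨y, t2⟩
    · rw [List.nil_append, List.nil_append, loopR_zeros (k1 + k2) k1 k2 rfl c cnt hc, loopR,
        if_pos ⟨rfl, rfl⟩]
    · rw [List.nil_append, List.cons_append]
      rw [loopR_ne _ _ _ _ (by simp), loopR_ne ([]:List Int) (y :: t2) _ _ (by simp)]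
      simp only [List.headD_cons, List.tail_cons, List.headD_nil, List.tail_nil,
        headD_replicate, tail_replicate]
      split_ifs with h
      · exact ih (0 + t2.length) (by simp at hn ⊢; omega) [] t2 (by simp) (k1-1) k2 1 (cnt+1) (by simp)
      · exact ih (0 + t2.length) (by simp at hn ⊢; omega) [] t2 (by simp) (k1-1) k2 0 cnt (by simp)
    · rw [List.nil_append, List.cons_append]
      rw [loopR_ne _ _ _ _ (by simp), loopR_ne (x :: t1) ([]:List Int) _ _ (by simp)]
      simp only [List.headD_cons, List.tail_cons, List.headD_nil, List.tail_nil,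
        headD_replicate, tail_replicate]
      split_ifs with h
      · exact ih (t1.length + 0) (by simp at hn ⊢; omega) t1 [] (by simp) k1 (k2-1) 1 (cnt+1) (by simp)
      · exact ih (t1.length + 0) (by simp at hn ⊢; omega) t1 [] (by simp) k1 (k2-1) 0 cnt (by simp)
    · rw [List.cons_append, List.cons_append]
      rw [loopR_ne _ _ _ _ (by simp), loopR_ne (x :: t1) (y :: t2) _ _ (by simp)]
      simp only [List.headD_cons, List.tail_cons]
      split_ifs with h
      · exact ih (t1.length + t2.length) (by simp at hn ⊢; omega) t1 t2 rfl k1 k2 1 (cnt+1) (by simp)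
      · exact ih (t1.length + t2.length) (by simp at hn ⊢; omega) t1 t2 rfl k1 k2 0 cnt (by simp)

-- ===== final assembly =====
theorem map_pyIntChar_eq_dl (cs : List Char) (hd : ∀ c ∈ cs, c ∈ digitChars) :
    cs.reverse.map pyIntChar = cs.reverse.map dl := by
  apply List.map_congr_left
  intro c hc
  exact pyIntChar_digit c (hd c (List.mem_reverse.mp hc))

theorem Dg_map_dl (cs : List Char) (hd : ∀ c ∈ cs, c ∈ digitChars) : Dg (cs.reverse.map dl) := by
  intro x hx
  obtain ⟨c, hc, rfl⟩ := List.mem_map.mp hx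
  exact dl_digit c (hd c (List.mem_reverse.mp hc))

theorem Dg_append_replicate (r : List Int) (h : Dg r) (m : Nat) : Dg (r ++ List.replicate m 0) := by
  intro x hx
  rcases List.mem_append.mp hx with hx | hx
  · exact h x hx
  · have := List.eq_of_mem_replicate hx
    omega

theorem carriesCount_eq_loopR (num1 num2 : String) (h : Pre_carriesCount num1 num2) :
    carriesCount num1 num2 =
      loopR (num1.toList.reverse.map dl) (num2.toList.reverse.map dl) 0 0 := by
  rw [Pre_carriesCount, Bool.and_eq_true, List.all_eq_true, List.all_eq_true] at h
  simp only [decide_eq_true_eq] at h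
  obtain ⟨hd1, hd2⟩ := h
  unfold carriesCount
  rw [loopA_eq num1.toList num2.toList hd1 hd2
      (num1.toList.length + num2.toList.length) _ _ rfl le_rfl le_rfl 0 0]
  rw [List.take_length, List.take_length]

theorem carriesCount_alt_eq_loopR (num1 num2 : String) (h : Pre_carriesCount num1 num2) :
    carriesCount_alt num1 num2 =
      loopR (num1.toList.reverse.map dl) (num2.toList.reverse.map dl) 0 0 := by
  rw [Pre_carriesCount, Bool.and_eq_true, List.all_eq_true, List.all_eq_true] at h
  simp only [decide_eq_true_eq] at h
  obtain ⟨hd1, hd2⟩ := h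
  unfold carriesCount_alt
  rw [map_pyIntChar_eq_dl _ hd1, map_pyIntChar_eq_dl _ hd2]
  set R1 := num1.toList.reverse.map dl with hR1
  set R2 := num2.toList.reverse.map dl with hR2
  set n := max R1.length R2.length with hnn
  set p1 := R1 ++ List.replicate (n - R1.length) 0 with hp1
  set p2 := R2 ++ List.replicate (n - R2.length) 0 with hp2
  have hD1 : Dg R1 := Dg_map_dl _ hd1
  have hD2 : Dg R2 := Dg_map_dl _ hd2
  have hDp1 : Dg p1 := Dg_append_replicate R1 hD1 _
  have hDp2 : Dg p2 := Dg_append_replicate R2 hD2 _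
  have hle1 : R1.length ≤ n := by rw [hnn]; exact le_max_left _ _
  have hle2 : R2.length ≤ n := by rw [hnn]; exact le_max_right _ _
  have hlen1 : p1.length = n := by rw [hp1]; simp; omega
  have hlen2 : p2.length = n := by rw [hp2]; simp; omega
  have hfst : (p1.zip p2).map Prod.fst = p1 := List.map_fst_zip (by rw [hlen1, hlen2])
  have hsnd : (p1.zip p2).map Prod.snd = p2 := List.map_snd_zip (by rw [hlen1, hlen2])
  rw [foldB_eq_K (p1.zip p2) 0 1 0 0]
  rw [← loopR_eq_K (p1.zip p2) 1 0 0 0 0 (by rw [hfst]; exact hDp1) (by rw [hsnd]; exact hDp2)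
    one_pos le_rfl one_pos le_rfl one_pos (by norm_num)]
  rw [hfst, hsnd, hp1, hp2]
  exact loopR_pad (R1.length + R2.length) R1 R2 rfl _ _ 0 0 (Or.inl rfl)

-- ===== VERDICT (by name: the statement is the Claim_ definition above) =====
theorem carriesCount_spec : Claim_equal_carriesCount := by
  intro num1 num2 _ hpre
  unfold Spec_carriesCount
  rw [carriesCount_eq_loopR num1 num2 hpre, carriesCount_alt_eq_loopR num1 num2 hpre]
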